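-- pv_equiv track=rewrite | github.com/ThomasZumsteg/project-euler | problem_0051.py | sub_pattern
-- ===== SOURCE A (Python) =====
-- def sub_pattern(string,c):
--     string = list(string)
--     while True:
--         for i in range(len(string)):
--             if string[i] == c: string[i] = '.'
--             elif string[i] == '.':
--                 string[i] = c
--                 break
--         if '.' in string: yield ''.join(string)
--         else: break
-- ===== SOURCE B (Python) =====
-- def sub_pattern(string, c):
--     # counter-based rewrite: variable positions (chars equal to c or '.') encode a
--     # binary number ('.'=1, LSB leftmost); A's odometer counts it down mod 2**k.
--     chars = list(string)
--     k = 0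
--     start = 0
--     for ch in reversed(chars):
--         if ch == c or ch == '.':
--             start = 2 * start + (1 if ch == '.' else 0)
--             k += 1
--     v = (start - 1) % (1 << k)
--     while v > 0:
--         out = []
--         bits = v
--         for ch in chars:
--             if ch == c or ch == '.':
--                 out.append('.' if bits % 2 else c)
--                 bits //= 2
--             else:
--                 out.append(ch)
--         yield ''.join(out)
--         v -= 1
-- ===== Notes on version B (the rewrite author's own statement) =====
-- stated objective: alternative
-- what changed: Replaces A's in-place carry odometer over the character list by a single integer counter: the variable positions (chars equal to c or '.') encode a binary number, which B scans downward from (start-1) mod 2**k to 1, rebuilding each string by bit extraction.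
import Mathlib
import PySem

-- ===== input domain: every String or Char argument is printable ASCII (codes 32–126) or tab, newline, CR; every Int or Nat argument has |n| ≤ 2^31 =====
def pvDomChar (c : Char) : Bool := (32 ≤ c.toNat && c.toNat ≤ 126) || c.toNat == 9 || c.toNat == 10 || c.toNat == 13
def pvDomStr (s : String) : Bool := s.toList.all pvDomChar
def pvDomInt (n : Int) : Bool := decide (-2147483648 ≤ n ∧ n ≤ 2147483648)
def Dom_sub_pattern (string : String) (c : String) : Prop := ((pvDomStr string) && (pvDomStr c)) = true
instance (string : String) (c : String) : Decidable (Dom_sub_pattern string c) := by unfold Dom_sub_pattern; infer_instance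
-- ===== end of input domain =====

-- B replaces A's in-place carry odometer by an integer counter scanned downward with
-- bit extraction (objective: alternative decomposition, same asymptotic cost).
-- Both ports return the LIST of the generator's yields.

-- ===== PORT A =====
-- one pass of A's for-loop: c -> '.', first '.' -> c then stop
def aStep (c : String) : List String → List String
  | [] => []
  | x :: xs =>
      if x = c then "." :: aStep c xs
      else if x = "." then c :: xs
      else x :: aStep c xs

-- A's 'while True' loop; fuel is only a totality guard (under Pre_ the loop runs
-- at most 2^len times, so the fuel below is never exhausted)
def aLoop (c : String) : Nat → List String → List String
  | 0, _ => []
  | fuel + 1, st =>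
      let st' := aStep c st
      if ("." : String) ∈ st' then PySem.Str.join "" st' :: aLoop c fuel st'
      else []

def sub_pattern (string : String) (c : String) : List String :=
  let st := string.toList.map (fun ch => String.ofList [ch])
  aLoop c (2 ^ st.length + 1) st

-- ===== PORT B =====
-- rebuild the character list for counter value bits ('.' where the bit is 1)
def bBuild (c : String) (bits : Nat) : List String → List String
  | [] => []
  | ch :: t =>
      if ch = c ∨ ch = "." then
        (if bits % 2 = 1 then "." else c) :: bBuild c (bits / 2) t
      else ch :: bBuild c bits t

-- B's 'while v > 0: yield …; v -= 1'
def bLoop (c : String) (chars : List String) : Nat → List String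
  | 0 => []
  | v + 1 => PySem.Str.join "" (bBuild c (v + 1) chars) :: bLoop c chars v

def sub_pattern_alt (string : String) (c : String) : List String :=
  let chars := string.toList.map (fun ch => String.ofList [ch])
  let p := chars.reverse.foldl
      (fun (p : Nat × Nat) ch =>
        if ch = c ∨ ch = "." then (p.1 + 1, 2 * p.2 + (if ch = "." then 1 else 0)) else p)
      (0, 0)
  bLoop c chars (PySem.Int.mod ((p.2 : Int) - 1) (2 ^ p.1)).toNat

-- ===== PRECONDITION & SPEC =====
-- Pre_ excludes only c = "." with a '.' already in the string: there A's step is the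
-- identity and the generator yields the same string forever (divergence, no value).
def Pre_sub_pattern (string : String) (c : String) : Prop :=
  ¬ (c = "." ∧ ('.' : Char) ∈ string.toList)
instance (string : String) (c : String) : Decidable (Pre_sub_pattern string c) := by
  unfold Pre_sub_pattern; infer_instance

def pvWitness_sub_pattern : String × String := ("13", "1")

def Spec_sub_pattern (string : String) (c : String) (out : List String) : Prop :=
  out = sub_pattern_alt string c
instance (string : String) (c : String) (out : List String) : Decidable (Spec_sub_pattern string c out) := by
  unfold Spec_sub_pattern; infer_instance

-- ===== CLAIM (what is proved, stated in full; the proofs are below) =====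
def Claim_equal_sub_pattern : Prop := ∀ (string : String) (c : String), Dom_sub_pattern string c → Pre_sub_pattern string c → Spec_sub_pattern string c (sub_pattern string c)

-- ===== LEMMAS AND PROOFS =====

-- number of variable positions (elements equal to c or ".")
def kOf (c : String) : List String → Nat
  | [] => 0
  | x :: xs => (if x = c ∨ x = "." then 1 else 0) + kOf c xs

-- the counter value encoded by the initial list ('.' = 1, LSB leftmost)
def vOf (c : String) : List String → Nat
  | [] => 0
  | x :: xs => if x = c ∨ x = "." then (if x = "." then 1 else 0) + 2 * vOf c xs else vOf c xs

theorem kOf_le_length (c : String) (l : List String) : kOf c l ≤ l.length := by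
  induction l with
  | nil => simp [kOf]
  | cons x xs ih => simp only [kOf, List.length_cons]; split <;> omega

theorem vOf_lt (c : String) (l : List String) : vOf c l < 2 ^ kOf c l := by
  induction l with
  | nil => simp [vOf, kOf]
  | cons x xs ih =>
    by_cases h : x = c ∨ x = "."
    · simp only [vOf, kOf, if_pos h]
      have h2 : 2 ^ (1 + kOf c xs) = 2 * 2 ^ kOf c xs := by ring
      split <;> omega
    · simp only [vOf, kOf, if_neg h]
      simpa using ih

theorem scan_eq (c : String) (l : List String) :
    l.reverse.foldl
      (fun (p : Nat × Nat) ch =>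
        if ch = c ∨ ch = "." then (p.1 + 1, 2 * p.2 + (if ch = "." then 1 else 0)) else p)
      (0, 0) = (kOf c l, vOf c l) := by
  rw [List.foldl_reverse]
  induction l with
  | nil => simp [kOf, vOf]
  | cons x xs ih =>
    simp only [List.foldr_cons, ih, kOf, vOf]
    split
    · simp [Nat.add_comm]
    · simp

theorem bBuild_vOf (c : String) (l : List String)
    (hv : ∀ x ∈ l, (x = c ∨ x = ".") → c ≠ ".") : bBuild c (vOf c l) l = l := by
  induction l with
  | nil => rfl
  | cons x xs ih =>
    have ih' := ih (fun x hx => hv x (List.mem_cons_of_mem _ hx))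
    by_cases h : x = c ∨ x = "."
    · have hc : c ≠ "." := hv x List.mem_cons_self h
      by_cases hd : x = "."
      · have h1 : (1 + 2 * vOf c xs) % 2 = 1 := by omega
        have h2 : (1 + 2 * vOf c xs) / 2 = vOf c xs := by omega
        simp [bBuild, vOf, h, hd, h1, h2, ih']
      · have hxc : x = c := h.resolve_right hd
        have h1 : (0 + 2 * vOf c xs) % 2 = 0 := by omega
        have h2 : (0 + 2 * vOf c xs) / 2 = vOf c xs := by omega
        simp [bBuild, vOf, h, hxc, hc, h1, h2, ih']
    · simp [bBuild, vOf, h, ih']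

theorem aStep_bBuild (c : String) (l : List String)
    (hv : ∀ x ∈ l, (x = c ∨ x = ".") → c ≠ ".") :
    ∀ v, v < 2 ^ kOf c l →
      aStep c (bBuild c v l) = bBuild c (if v = 0 then 2 ^ kOf c l - 1 else v - 1) l := by
  induction l with
  | nil =>
    intro v hvlt
    simp only [kOf, pow_zero] at hvlt
    interval_cases v
    simp [bBuild, aStep]
  | cons x xs ih =>
    intro v hvlt
    have ih' := ih (fun x hx => hv x (List.mem_cons_of_mem _ hx))
    by_cases h : x = c ∨ x = "."
    · have hc : c ≠ "." := hv x List.mem_cons_self h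
      have h2 : 2 ^ (1 + kOf c xs) = 2 * 2 ^ kOf c xs := by ring
      simp only [kOf, if_pos h] at hvlt ⊢
      rw [h2] at hvlt ⊢
      by_cases hpar : v % 2 = 1
      · -- head is ".", A flips it back to c and stops; v is odd so v-1 halves to v/2
        have hv0 : v ≠ 0 := by omega
        have ha : (v - 1) % 2 = 0 := by omega
        have hhalf : (v - 1) / 2 = v / 2 := by omega
        have hdc : ("." : String) ≠ c := fun hh => hc hh.symm
        simp [bBuild, aStep, h, hpar, hv0, hdc, ha, hhalf]
      · -- head is c, A sets it to "." and carries into the tail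
        have hpar0 : v % 2 = 0 := by omega
        have hp1 : ¬ (v % 2 = 1) := by omega
        simp only [bBuild, h, if_pos, if_neg hp1, aStep, if_pos rfl]
        rw [ih' (v / 2) (by omega)]
        by_cases hv0 : v = 0
        · subst hv0
          have hpos : 0 < 2 ^ kOf c xs := by positivity
          have ha : (2 * 2 ^ kOf c xs - 1) % 2 = 1 := by omega
          have hb : (2 * 2 ^ kOf c xs - 1) / 2 = 2 ^ kOf c xs - 1 := by omega
          simp [bBuild, h, ha, hb]
        · have hvd : v / 2 ≠ 0 := by omega
          rw [if_neg hvd]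
          have ha : (v - 1) % 2 = 1 := by omega
          have hb : (v - 1) / 2 = v / 2 - 1 := by omega
          simp [bBuild, h, hv0, ha, hb]
    · have hxc : x ≠ c := fun hh => h (Or.inl hh)
      have hxd : x ≠ "." := fun hh => h (Or.inr hh)
      simp only [kOf, if_neg h, Nat.zero_add] at hvlt ⊢
      simp only [bBuild, h, if_neg, not_false_iff, aStep]
      rw [if_neg hxc, if_neg hxd, ih' v hvlt]

theorem dot_mem_bBuild (c : String) (l : List String)
    (hv : ∀ x ∈ l, (x = c ∨ x = ".") → c ≠ ".") :
    ∀ v, v < 2 ^ kOf c l → ((("." : String) ∈ bBuild c v l) ↔ v ≠ 0) := by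
  induction l with
  | nil =>
    intro v hvlt
    simp only [kOf, pow_zero] at hvlt
    interval_cases v
    simp [bBuild]
  | cons x xs ih =>
    intro v hvlt
    have ih' := ih (fun x hx => hv x (List.mem_cons_of_mem _ hx))
    by_cases h : x = c ∨ x = "."
    · have hc : c ≠ "." := hv x List.mem_cons_self h
      have h2 : 2 ^ (1 + kOf c xs) = 2 * 2 ^ kOf c xs := by ring
      simp only [kOf, if_pos h] at hvlt
      rw [h2] at hvlt
      by_cases hpar : v % 2 = 1
      · have : v ≠ 0 := by omega
        simp [bBuild, h, hpar, this]
      · have hpar0 : ¬ (v % 2 = 1) := hpar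
        have hiff := ih' (v / 2) (by omega)
        simp only [bBuild, h, if_pos, if_neg hpar0, List.mem_cons, hiff]
        constructor
        · rintro (hh | hh)
          · exact absurd hh.symm hc
          · omega
        · intro hh; right; omega
    · have hxd : x ≠ "." := fun hh => h (Or.inr hh)
      simp only [kOf, if_neg h, Nat.zero_add] at hvlt
      have hiff := ih' v hvlt
      simp only [bBuild, h, if_neg, not_false_iff, List.mem_cons, hiff]
      constructor
      · rintro (hh | hh)
        · exact absurd hh.symm hxd
        · exact hh
      · intro hh; right; exact hh

theorem aLoop_bBuild (c : String) (l : List String)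
    (hv : ∀ x ∈ l, (x = c ∨ x = ".") → c ≠ ".") :
    ∀ v fuel, 1 ≤ v → v < 2 ^ kOf c l → v ≤ fuel →
      aLoop c fuel (bBuild c v l) = bLoop c l (v - 1) := by
  intro v
  induction v with
  | zero => omega
  | succ m ihm =>
    intro fuel _ hvlt hfuel
    obtain ⟨f, rfl⟩ : ∃ f, fuel = f + 1 := ⟨fuel - 1, by omega⟩
    have hstep : aStep c (bBuild c (m + 1) l) = bBuild c m l := by
      rw [aStep_bBuild c l hv (m + 1) hvlt, if_neg (by omega : ¬ (m + 1 = 0))]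
      simp
    simp only [aLoop, hstep]
    cases m with
    | zero =>
      rw [if_neg]
      · rfl
      · rw [dot_mem_bBuild c l hv 0 (by omega)]; simp
    | succ m' =>
      rw [if_pos]
      · rw [ihm (f) (by omega) (by omega) (by omega)]
        simp [bLoop]
      · rw [dot_mem_bBuild c l hv (m' + 1) (by omega)]; omega

theorem mk_singleton_eq_dot {ch : Char} (h : String.ofList [ch] = ".") : ch = '.' := by
  have : (String.ofList [ch]).toList = ("." : String).toList := by rw [h]
  simpa using this

theorem sub_pattern_eq (string : String) (c : String) (hpre : Pre_sub_pattern string c) :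
    sub_pattern string c = sub_pattern_alt string c := by
  unfold sub_pattern sub_pattern_alt
  dsimp only
  set l : List String := string.toList.map (fun ch => String.ofList [ch]) with hl
  have hv : ∀ x ∈ l, (x = c ∨ x = ".") → c ≠ "." := by
    intro x hx hvar hc
    subst hc
    have hxd : x = "." := hvar.elim id id
    rw [hl] at hx
    obtain ⟨ch, hch, rfl⟩ := List.mem_map.mp hx
    exact hpre ⟨rfl, (mk_singleton_eq_dot hxd) ▸ hch⟩
  clear_value l
  rw [scan_eq c l]
  have hklen : kOf c l ≤ l.length := kOf_le_length c l
  have hvlt : vOf c l < 2 ^ kOf c l := vOf_lt c l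
  have hpow : (0 : Int) < 2 ^ kOf c l := by positivity
  have hcast : ((2 : Int) ^ kOf c l) = ((2 ^ kOf c l : Nat) : Int) := by push_cast; ring
  have hmod : (PySem.Int.mod ((vOf c l : Int) - 1) (2 ^ kOf c l)).toNat
      = if vOf c l = 0 then 2 ^ kOf c l - 1 else vOf c l - 1 := by
    rw [PySem.Int.mod_eq_emod_of_pos hpow]
    by_cases h0 : vOf c l = 0
    · rw [h0, if_pos rfl]
      have he : ((0 : Nat) : Int) - 1 = (2 ^ kOf c l - 1) + (-1) * 2 ^ kOf c l := by
        push_cast; ring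
      rw [he, Int.add_mul_emod_self_right, Int.emod_eq_of_lt (by omega) (by omega)]
      rw [hcast]
      omega
    · rw [if_neg h0]
      have h1 : 1 ≤ vOf c l := Nat.one_le_iff_ne_zero.mpr h0
      have h2 : ((vOf c l : Int)) < 2 ^ kOf c l := by
        rw [hcast]; exact_mod_cast hvlt
      rw [Int.emod_eq_of_lt (by omega) (by omega)]
      omega
  rw [hmod]
  set F := 2 ^ l.length + 1 with hF
  have hstate : l = bBuild c (vOf c l) l := (bBuild_vOf c l hv).symm
  have hfuel : 2 ^ kOf c l ≤ 2 ^ l.length := Nat.pow_le_pow_right (by omega) hklen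
  by_cases h0 : vOf c l = 0
  · rw [if_pos h0]
    conv_lhs => rw [hstate]
    rw [h0, hF]
    have hstep : aStep c (bBuild c 0 l) = bBuild c (2 ^ kOf c l - 1) l := by
      rw [aStep_bBuild c l hv 0 (by positivity)]
      simp
    simp only [aLoop, hstep]
    by_cases hk0 : kOf c l = 0
    · have hnd : ¬ (("." : String) ∈ bBuild c (2 ^ kOf c l - 1) l) := by
        rw [dot_mem_bBuild c l hv (2 ^ kOf c l - 1) (by omega)]
        simp [hk0]
      rw [if_neg hnd, hk0]
      simp [bLoop]
    · have hk1 : 1 ≤ 2 ^ kOf c l - 1 := by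
        have h2 : 2 ≤ 2 ^ kOf c l := by
          calc 2 = 2 ^ 1 := rfl
          _ ≤ 2 ^ kOf c l := Nat.pow_le_pow_right (by omega) (by omega)
        omega
      have hd : ("." : String) ∈ bBuild c (2 ^ kOf c l - 1) l := by
        rw [dot_mem_bBuild c l hv (2 ^ kOf c l - 1) (by omega)]
        omega
      rw [if_pos hd]
      rw [aLoop_bBuild c l hv (2 ^ kOf c l - 1) (2 ^ l.length) hk1 (by omega) (by omega)]
      have hsplit : 2 ^ kOf c l - 1 = (2 ^ kOf c l - 2) + 1 := by omega
      rw [hsplit]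
      simp [bLoop]
  · rw [if_neg h0]
    conv_lhs => rw [hstate]
    rw [hF]
    exact aLoop_bBuild c l hv (vOf c l) (2 ^ l.length + 1)
      (Nat.one_le_iff_ne_zero.mpr h0) hvlt (by omega)

-- ===== VERDICT (by name: the statement is the Claim_ definition above) =====
theorem sub_pattern_spec : Claim_equal_sub_pattern := by
  intro string c _ hpre
  unfold Spec_sub_pattern
  exact sub_pattern_eq string c hpre
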